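-- pv_equiv track=rewrite | github.com/GeorgRashkov/Pixel_Colour_Manipulator | app/Number_format_checker.py | check_for_int_format
-- ===== SOURCE A (Python) =====
-- def check_for_int_format(txt_value:str):
--
--         if(txt_value == ''):
--             return True
--         elif(
--             (txt_value.__contains__('-') and txt_value[0] != '-') or
--             (txt_value[0] == '-' and len(txt_value) == 1)
--             ):
--             return False
--
--         allowed_chars = ['0','1','2','3','4','5','6','7','8','9', '-']
--
--         minus_counter = 0
--
--         for symbol in txt_value:
--
--             if(symbol not in allowed_chars):
--                 return False
--
--             if(symbol == '-'):
--                 minus_counter += 1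
--
--             if(minus_counter > 1):
--                 return False
--
--         return check_for_leading_zeros(txt_value)
--
-- def check_for_leading_zeros(txt_value:str):
--
--     if(len(txt_value) < 2):
--         return True
--
--     digits = ['0','1','2','3','4','5','6','7','8','9']
--
--     if(
--         (txt_value[0] == "0" and txt_value[1] != ".")
--         or (len(txt_value) > 2 and txt_value[0] == "-" and txt_value[1] == "0" and txt_value[2] != ".")
--         ):
--         return False
--
--     return True
-- ===== SOURCE B (Python) =====
-- def check_for_int_format(txt_value: str):
--     # Strip an optional leading '-', then the rest must be empty (only if the
--     # whole string was empty) or a digit run with no leading zero (except "0").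
--     body = txt_value[1:] if txt_value.startswith('-') else txt_value
--     if body == '':
--         return txt_value == ''
--     return body.isdigit() and (body == '0' or body[0] != '0')
-- ===== Notes on version B (the rewrite author's own statement) =====
-- stated objective: simpler
-- what changed: Replaces A's guard chain, allowed-chars scan with a minus counter, and separate leading-zero helper by a single strip-the-optional-sign decomposition: the remainder must be empty (only for the empty input) or an all-digit run that is either the single zero digit or starts with a nonzero digit.
import Mathlib
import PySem

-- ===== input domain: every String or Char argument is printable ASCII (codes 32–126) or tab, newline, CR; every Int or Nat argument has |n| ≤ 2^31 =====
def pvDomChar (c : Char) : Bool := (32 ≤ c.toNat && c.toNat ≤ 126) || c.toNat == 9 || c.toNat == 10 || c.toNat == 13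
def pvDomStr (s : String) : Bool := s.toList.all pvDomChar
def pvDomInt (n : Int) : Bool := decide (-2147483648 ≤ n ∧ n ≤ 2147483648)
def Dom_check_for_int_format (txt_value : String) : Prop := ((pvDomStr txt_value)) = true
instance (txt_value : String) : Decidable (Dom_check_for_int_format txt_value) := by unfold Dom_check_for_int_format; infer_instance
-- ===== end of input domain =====

-- B replaces A's guard chain + counting loop + leading-zero helper with one
-- strip-the-optional-sign decomposition (empty, or a digit run with no leading zero); objective: simpler.

-- ===== PORT A =====
-- helper check_for_leading_zeros (the unused 'digits' list of A is omitted as dead code)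
def check_for_leading_zeros (txt_value : String) : Bool :=
  let cs := txt_value.toList
  if cs.length < 2 then true
  else if ((PySem.List.pyGetD cs 0 ' ' == '0' && !(PySem.List.pyGetD cs 1 ' ' == '.')) ||
           (decide (cs.length > 2) && PySem.List.pyGetD cs 0 ' ' == '-' &&
            PySem.List.pyGetD cs 1 ' ' == '0' && !(PySem.List.pyGetD cs 2 ' ' == '.')))
  then false
  else true

-- the 'for symbol in txt_value' loop with its two early returns; state = minus_counter;
-- 'some b' = early 'return b', 'none' = loop fell through
def pvALoop (allowed : List Char) : List Char → Int → Option Bool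
  | [], _ => none
  | c :: rest, mc =>
    if !(allowed.contains c) then some false
    else
      let mc := if c == '-' then mc + 1 else mc
      if mc > 1 then some false
      else pvALoop allowed rest mc

def check_for_int_format (txt_value : String) : Bool :=
  let cs := txt_value.toList
  if cs.isEmpty then true
  else if (cs.contains '-' && !(PySem.List.pyGetD cs 0 ' ' == '-')) ||
          (PySem.List.pyGetD cs 0 ' ' == '-' && cs.length == 1) then false
  else
    let allowed : List Char := ['0','1','2','3','4','5','6','7','8','9','-']
    match pvALoop allowed cs 0 with
    | some b => b
    | none => check_for_leading_zeros txt_value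

-- ===== PORT B =====
def check_for_int_format_alt (txt_value : String) : Bool :=
  let body :=
    if PySem.Str.startswith txt_value "-" then (PySem.Str.slice txt_value (some 1) none).toList
    else txt_value.toList
  if body.isEmpty then txt_value.toList.isEmpty
  else PySem.Chars.strIsdigit body && (body == ['0'] || !(PySem.List.pyGetD body 0 ' ' == '0'))

-- ===== PRECONDITION & SPEC =====
def Spec_check_for_int_format (txt_value : String) (out : Bool) : Prop := out = check_for_int_format_alt txt_value
instance (txt_value : String) (out : Bool) : Decidable (Spec_check_for_int_format txt_value out) := by unfold Spec_check_for_int_format; infer_instance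

-- ===== CLAIM (what is proved, stated in full; the proofs are below) =====
def Claim_equal_check_for_int_format : Prop := ∀ (txt_value : String), Dom_check_for_int_format txt_value → Spec_check_for_int_format txt_value (check_for_int_format txt_value)

-- ===== LEMMAS AND PROOFS =====
lemma pv_char_eq_iff (c d : Char) : c = d ↔ c.toNat = d.toNat := eq_iff_eq_of_cmp_eq_cmp rfl

lemma pv_char_le_iff (c d : Char) : c ≤ d ↔ c.toNat ≤ d.toNat := Iff.rfl

-- membership in A's 'allowed_chars' minus '-' is exactly being an ASCII digit
lemma pv_digit_char (c : Char) :
    ((['0','1','2','3','4','5','6','7','8','9','-'] : List Char).contains c && !(c == '-'))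
      = PySem.Chars.isdigit c := by
  rw [Bool.eq_iff_iff]
  simp only [PySem.Chars.isdigit, List.contains_eq_mem, List.mem_cons, List.not_mem_nil, or_false,
    Bool.and_eq_true, Bool.not_eq_true', decide_eq_true_eq,
    beq_eq_false_iff_ne, ne_eq, pv_char_eq_iff, pv_char_le_iff]
  simp only [show ('0':Char).toNat = 48 from rfl, show ('1':Char).toNat = 49 from rfl,
    show ('2':Char).toNat = 50 from rfl, show ('3':Char).toNat = 51 from rfl,
    show ('4':Char).toNat = 52 from rfl, show ('5':Char).toNat = 53 from rfl,
    show ('6':Char).toNat = 54 from rfl, show ('7':Char).toNat = 55 from rfl,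
    show ('8':Char).toNat = 56 from rfl, show ('9':Char).toNat = 57 from rfl,
    show ('-':Char).toNat = 45 from rfl]
  omega

lemma pv_digit_ne_minus {c : Char} (h : PySem.Chars.isdigit c = true) : c ≠ '-' := by
  intro he; subst he; simp [PySem.Chars.isdigit] at h

-- with minus_counter already 1, the loop falls through iff everything left is a digit
lemma pvALoop_one (cs : List Char) :
    pvALoop ['0','1','2','3','4','5','6','7','8','9','-'] cs 1
      = if cs.all PySem.Chars.isdigit then none else some false := by
  induction cs with
  | nil => rfl
  | cons c rest ih =>
    by_cases hd : PySem.Chars.isdigit c = true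
    · have hall : (['0','1','2','3','4','5','6','7','8','9','-'] : List Char).contains c = true := by
        have := pv_digit_char c; rw [← this] at hd; exact (Bool.and_eq_true ..).mp hd |>.1
      have hne : (c == '-') = false := by
        simp only [beq_eq_false_iff_ne]; exact pv_digit_ne_minus hd
      simp only [pvALoop, hall, hne, List.all_cons, hd, Bool.not_true, Bool.true_and]
      simp only [Bool.false_eq_true, if_false]
      rw [if_neg (by omega : ¬((1:Int) > 1))]
      exact ih
    · by_cases hm : c = '-'
      · subst hm
        simp only [pvALoop, List.all_cons, hd]
        norm_num
      · have hno : (['0','1','2','3','4','5','6','7','8','9','-'] : List Char).contains c = false := by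
          have := pv_digit_char c
          have hne : (c == '-') = false := by simpa using hm
          rw [hne] at this; simpa [hd] using this.symm
        simp only [pvALoop, hno, Bool.not_false, if_true, List.all_cons, Bool.not_eq_true] at hd ⊢
        simp [hd]

-- with no '-' anywhere and counter 0, likewise
lemma pvALoop_zero_nominus (cs : List Char) (h : '-' ∉ cs) :
    pvALoop ['0','1','2','3','4','5','6','7','8','9','-'] cs 0
      = if cs.all PySem.Chars.isdigit then none else some false := by
  induction cs with
  | nil => rfl
  | cons c rest ih =>
    have hc : c ≠ '-' := fun he => h (he ▸ List.mem_cons_self)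
    have hrest : '-' ∉ rest := fun hr => h (List.mem_cons_of_mem _ hr)
    have hne : (c == '-') = false := by simpa using hc
    by_cases hd : PySem.Chars.isdigit c = true
    · have hall : (['0','1','2','3','4','5','6','7','8','9','-'] : List Char).contains c = true := by
        have := pv_digit_char c; rw [← this] at hd; exact (Bool.and_eq_true ..).mp hd |>.1
      simp only [pvALoop, hall, hne, List.all_cons, hd, Bool.not_true, Bool.true_and]
      simp only [Bool.false_eq_true, if_false]
      rw [if_neg (by omega : ¬((0:Int) > 1))]
      exact ih hrest
    · have hno : (['0','1','2','3','4','5','6','7','8','9','-'] : List Char).contains c = false := by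
        have := pv_digit_char c; rw [hne] at this; simpa [hd] using this.symm
      simp only [pvALoop, hno, List.all_cons, Bool.not_false, if_true, Bool.not_eq_true] at hd ⊢
      simp [hd]

lemma pv_digit_ne_dot {c : Char} (h : PySem.Chars.isdigit c = true) : (c == '.') = false := by
  simp only [beq_eq_false_iff_ne, ne_eq]
  intro he; subst he; simp [PySem.Chars.isdigit] at h

lemma pv_all_false_of_minus_mem {l : List Char} (h : '-' ∈ l) :
    l.all PySem.Chars.isdigit = false := by
  simp only [List.all_eq_false]
  exact ⟨'-', h, by simp [PySem.Chars.isdigit]⟩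

lemma pv_single_digit (c : Char) (h : PySem.Chars.isdigit c = true) :
    (([c] == (['0'] : List Char)) || !(PySem.List.pyGetD [c] 0 ' ' == '0')) = true := by
  by_cases h0 : c = '0'
  · subst h0; decide
  · have : (c == '0') = false := by simpa using h0
    simp [PySem.List.pyGetD, PySem.List.pyGet?, PySem.List.pyIdx?, this, h0]

lemma pv_getD0 (a : Char) (l : List Char) : PySem.List.pyGetD (a :: l) 0 ' ' = a := by
  simp [PySem.List.pyGetD, PySem.List.pyGet?, PySem.List.pyIdx?]

lemma pv_getD1 (a b : Char) (l : List Char) : PySem.List.pyGetD (a :: b :: l) 1 ' ' = b := by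
  simp [PySem.List.pyGetD, PySem.List.pyGet?, PySem.List.pyIdx?]

lemma pv_getD2 (a b c : Char) (l : List Char) : PySem.List.pyGetD (a :: b :: c :: l) 2 ' ' = c := by
  simp only [PySem.List.pyGetD, PySem.List.pyGet?, PySem.List.pyIdx?]
  rw [if_pos (show (0:Int) ≤ 2 by omega),
    if_pos (show (2:Int) < ((a :: b :: c :: l).length : Int) by push_cast [List.length_cons]; omega)]
  rfl

-- one step of A's loop on a leading '-': counter becomes 1
lemma pvALoop_minus_step (l : List Char) :
    pvALoop ['0','1','2','3','4','5','6','7','8','9','-'] ('-' :: l) 0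
      = pvALoop ['0','1','2','3','4','5','6','7','8','9','-'] l 1 := by
  simp [pvALoop]

-- ===== VERDICT (by name: the statement is the Claim_ definition above) =====
theorem check_for_int_format_spec : Claim_equal_check_for_int_format := by
  intro s _
  unfold Spec_check_for_int_format
  unfold check_for_int_format check_for_int_format_alt check_for_leading_zeros
  simp only [PySem.Str.startswith_eq, PySem.Str.toList_slice, PySem.Str.len_eq,
    PySem.Chars.slice_eq_listSlice]
  rw [show ("-" : String).toList = ['-'] from rfl,
    show PySem.List.slice s.toList (some 1) = s.toList.drop 1 from by
      rw [show (1:Int) = ((1:Nat):Int) from rfl, PySem.List.slice_from_natCast]]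
  generalize s.toList = cs
  match cs with
  | [] => decide
  | c :: rest =>
    by_cases hm : c = '-'
    · subst hm
      have hsw : PySem.Chars.startswith ('-' :: rest) ['-'] = true := by
        simp [PySem.Chars.startswith, List.isPrefixOf]
      simp only [hsw, if_true, List.drop_succ_cons, List.drop_zero, List.isEmpty_cons,
        Bool.false_eq_true, if_false, pv_getD0, List.contains_cons, BEq.rfl, Bool.not_true,
        Bool.and_false, Bool.true_or, Bool.false_or, Bool.true_and]
      match rest with
      | [] => decide
      | d :: rest2 =>
        have hlen1 : ((d :: rest2).length + 1 == 1) = false := by simp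
        simp only [List.length_cons, List.isEmpty_cons, hlen1,
          show (rest2.length + 1 + 1 == 1) = false by simp, Bool.false_eq_true, if_false]
        rw [pvALoop_minus_step, pvALoop_one]
        by_cases hall : (d :: rest2).all PySem.Chars.isdigit = true
        · have hd : PySem.Chars.isdigit d = true := by
            simp only [List.all_cons, Bool.and_eq_true] at hall; exact hall.1
          simp only [hall, if_true, PySem.Chars.strIsdigit, List.isEmpty_cons,
            Bool.not_false, Bool.true_and]
          match rest2 with
          | [] =>
            simp only [List.length_cons, List.length_nil]
            rw [if_neg (by omega)]
            simp only [pv_getD0, pv_getD1, show (('-':Char) == '0') = false from rfl,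
              Bool.false_and, Bool.false_or, show decide (0 + 1 + 1 > 2) = false from rfl,
              Bool.false_eq_true, if_false]
            simpa [hall] using pv_single_digit d hd
          | e :: rest3 =>
            have he : PySem.Chars.isdigit e = true := by
              simp only [List.all_cons, Bool.and_eq_true] at hall; exact hall.2.1
            simp only [List.length_cons]
            rw [if_neg (by omega), pv_getD0, pv_getD1, pv_getD2, pv_digit_ne_dot he]
            have hmz : (('-':Char) == '0') = false := by decide
            simp only [hmz, Bool.false_and, Bool.false_or, BEq.rfl, Bool.and_true,
              show (decide (rest3.length + 1 + 1 + 1 > 2)) = true by simp, Bool.true_and,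
              Bool.not_true, Bool.and_false]
            by_cases h0 : d = '0'
            · subst h0
              simp [hall]
            · have hne0 : (d == '0') = false := by simpa using h0
              simp [hne0, hall, h0]
        · simp only [Bool.not_eq_true] at hall
          simp [hall, PySem.Chars.strIsdigit]
    · have hne : (c == '-') = false := by simpa using hm
      have hsw : PySem.Chars.startswith (c :: rest) ['-'] = false := by
        simp [PySem.Chars.startswith, List.isPrefixOf]
        exact fun he => hm he.symm
      simp only [hsw, Bool.false_eq_true, if_false, List.isEmpty_cons, pv_getD0,
        List.contains_cons, hne, Bool.false_or, Bool.false_and, Bool.or_false, Bool.not_false,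
        Bool.true_and, Bool.and_true]
      by_cases hcm : '-' ∈ c :: rest
      · have hAall := pv_all_false_of_minus_mem hcm
        have hmem : '-' ∈ rest := by
          rcases List.mem_cons.mp hcm with hh | ht
          · exact absurd hh.symm hm
          · exact ht
        simp [hmem, hAall, PySem.Chars.strIsdigit, List.contains_eq_mem]
      · have hrc : rest.contains '-' = false := by
          simp only [List.contains_eq_mem, decide_eq_false_iff_not]
          intro hr; exact hcm (List.mem_cons_of_mem _ hr)
        have hcc : ('-' == c) = false := by
          simp only [beq_eq_false_iff_ne, ne_eq]; exact fun he => hm he.symm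
        simp only [hrc, hcc, Bool.false_or, Bool.or_false, Bool.false_and, Bool.and_false,
          Bool.false_eq_true, if_false]
        rw [pvALoop_zero_nominus _ hcm]
        by_cases hall : (c :: rest).all PySem.Chars.isdigit = true
        · have hd : PySem.Chars.isdigit c = true := by
            simp only [List.all_cons, Bool.and_eq_true] at hall; exact hall.1
          simp only [hall, if_true, PySem.Chars.strIsdigit, List.isEmpty_cons,
            Bool.not_false, Bool.true_and]
          match rest with
          | [] =>
            simp only [List.length_cons, List.length_nil]
            rw [if_pos (by omega)]
            simpa [hall] using pv_single_digit c hd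
          | d :: rest2 =>
            have hdd : PySem.Chars.isdigit d = true := by
              simp only [List.all_cons, Bool.and_eq_true] at hall; exact hall.2.1
            simp only [List.length_cons]
            rw [if_neg (by omega), pv_getD1]
            simp only [pv_digit_ne_dot hdd, Bool.not_false, Bool.and_true]
            by_cases h0 : c = '0'
            · subst h0
              simp [hall]
            · have hne0 : (c == '0') = false := by simpa using h0
              simp [hne0, hall, h0]
        · simp only [Bool.not_eq_true] at hall
          simp [hall, PySem.Chars.strIsdigit]
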